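-- pv_equiv track=rewrite | github.com/lawang24/competitive-programming-archive | Codeforces/old_code/952/E.py | solve
-- ===== SOURCE A (Python) =====
-- def solve(x, y, z, k):
--     champ = 0
--
--     for a in range(1,x+1):
--         if k%a!=0:
--             continue
--         for b in range(1, y+1):
--             if (k//a)%b!=0:
--                 continue
--             for c in range(1, z+1):
--                 if a*b*c == k:
--                     champ = max(champ, (x-a+1)*(y-b+1)*(z-c+1) )
--
--     return champ
-- ===== SOURCE B (Python) =====
-- def solve(x, y, z, k):
--     # Build the list of achievable complement-volumes in one comprehension:
--     # for each divisor a of k and each divisor b of k//a, the third side is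
--     # forced to c = (k//a)//b; keep it only if 1 <= c <= z. Then take the max.
--     vols = [(x - a + 1) * (y - b + 1) * (z - (k // a) // b + 1)
--             for a in range(1, x + 1) if k % a == 0
--             for b in range(1, y + 1)
--             if (k // a) % b == 0 and 1 <= (k // a) // b <= z]
--     return max(vols, default=0)
-- ===== Notes on version B (the rewrite author's own statement) =====
-- stated objective: faster
-- what changed: Instead of A's triple nested loop with a running max (scanning every c), B builds in one two-level comprehension the list of volumes for divisor pairs (a,b) with the forced c=(k//a)//b checked against 1<=c<=z, and returns max(vols, default=0).
import Mathlib
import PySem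

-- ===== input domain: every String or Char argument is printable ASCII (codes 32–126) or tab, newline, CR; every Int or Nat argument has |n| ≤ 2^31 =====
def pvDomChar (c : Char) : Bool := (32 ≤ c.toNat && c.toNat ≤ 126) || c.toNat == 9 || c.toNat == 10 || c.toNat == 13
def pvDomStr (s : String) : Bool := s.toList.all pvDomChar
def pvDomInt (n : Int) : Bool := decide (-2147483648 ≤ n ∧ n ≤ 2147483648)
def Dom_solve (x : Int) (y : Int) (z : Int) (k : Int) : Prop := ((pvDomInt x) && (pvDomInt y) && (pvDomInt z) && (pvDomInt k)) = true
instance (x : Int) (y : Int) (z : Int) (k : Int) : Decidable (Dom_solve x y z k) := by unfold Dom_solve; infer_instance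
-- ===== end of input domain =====

-- B replaces A's triple accumulator loop by building the list of candidate volumes
-- (one per divisor pair (a,b), with the forced c = (k//a)//b) and taking max(vols, default=0):
-- asymptotically faster since the innermost scan over c disappears.

-- ===== PORT A =====
def solve (x : Int) (y : Int) (z : Int) (k : Int) : Int :=
  (PySem.List.pyRange 1 (x + 1) 1).foldl (fun champ a =>
    if PySem.Int.mod k a ≠ 0 then champ
    else (PySem.List.pyRange 1 (y + 1) 1).foldl (fun champ b =>
      if PySem.Int.mod (PySem.Int.floordiv k a) b ≠ 0 then champ
      else (PySem.List.pyRange 1 (z + 1) 1).foldl (fun champ c =>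
        if a * b * c = k then max champ ((x - a + 1) * (y - b + 1) * (z - c + 1))
        else champ) champ) champ) 0

-- ===== PORT B =====
-- the comprehension: divisors a of k, then divisors b of k//a whose forced c = (k//a)//b fits
def solve_alt_vols (x : Int) (y : Int) (z : Int) (k : Int) : List Int :=
  ((PySem.List.pyRange 1 (x + 1) 1).filter (fun a => PySem.Int.mod k a == 0)).flatMap
    (fun a =>
      ((PySem.List.pyRange 1 (y + 1) 1).filter (fun b =>
          PySem.Int.mod (PySem.Int.floordiv k a) b == 0 &&
          decide (1 ≤ PySem.Int.floordiv (PySem.Int.floordiv k a) b) &&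
          decide (PySem.Int.floordiv (PySem.Int.floordiv k a) b ≤ z))).map
        (fun b => (x - a + 1) * (y - b + 1)
          * (z - PySem.Int.floordiv (PySem.Int.floordiv k a) b + 1)))

def solve_alt (x : Int) (y : Int) (z : Int) (k : Int) : Int :=
  PySem.List.maxD (solve_alt_vols x y z k) (fun v => v) 0

-- ===== PRECONDITION & SPEC =====
def Spec_solve (x : Int) (y : Int) (z : Int) (k : Int) (out : Int) : Prop := out = solve_alt x y z k
instance (x : Int) (y : Int) (z : Int) (k : Int) (out : Int) : Decidable (Spec_solve x y z k out) := by unfold Spec_solve; infer_instance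

-- ===== CLAIM (what is proved, stated in full; the proofs are below) =====
def Claim_equal_solve : Prop := ∀ (x : Int) (y : Int) (z : Int) (k : Int), Dom_solve x y z k → Spec_solve x y z k (solve x y z k)

-- ===== LEMMAS AND PROOFS =====

-- a fold that bumps the accumulator to `max acc v` exactly when it meets c0
theorem foldl_max_at_point (c0 v : Int) (l : List Int) :
    ∀ acc : Int,
      l.foldl (fun ch c => if c = c0 then max ch v else ch) acc
        = if c0 ∈ l then max acc v else acc := by
  induction l with
  | nil => intro acc; simp
  | cons hd tl ih =>
    intro acc
    by_cases h : hd = c0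
    · subst h
      rw [List.foldl_cons, if_pos rfl, ih, if_pos List.mem_cons_self]
      split_ifs
      · rw [max_assoc, max_self]
      · rfl
    · rw [List.foldl_cons, if_neg h, ih]
      by_cases hm : c0 ∈ tl
      · rw [if_pos hm, if_pos (List.mem_cons_of_mem _ hm)]
      · rw [if_neg hm, if_neg (fun hc => by
          rcases List.mem_cons.mp hc with he | hm2
          · exact h he.symm
          · exact hm hm2)]

-- the innermost c-loop of A equals the direct check on the forced c, given the two divisibility filters
theorem inner_loop_eq (x y z k a b : Int) (ha : 1 ≤ a) (hb : 1 ≤ b)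
    (hda : a ∣ k) (hdb : b ∣ PySem.Int.floordiv k a) (champ : Int) :
    (PySem.List.pyRange 1 (z + 1) 1).foldl (fun champ c =>
        if a * b * c = k then max champ ((x - a + 1) * (y - b + 1) * (z - c + 1))
        else champ) champ =
      (if 1 ≤ PySem.Int.floordiv (PySem.Int.floordiv k a) b ∧
          PySem.Int.floordiv (PySem.Int.floordiv k a) b ≤ z then
        max champ ((x - a + 1) * (y - b + 1)
          * (z - PySem.Int.floordiv (PySem.Int.floordiv k a) b + 1))
      else champ) := by
  set c0 := PySem.Int.floordiv (PySem.Int.floordiv k a) b with hc0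
  have hqa : PySem.Int.floordiv k a = k / a := PySem.Int.floordiv_eq_ediv_of_pos (by omega)
  have hqb : c0 = (k / a) / b := by rw [hc0, hqa, PySem.Int.floordiv_eq_ediv_of_pos (by omega)]
  have hka : (k / a) * a = k := Int.ediv_mul_cancel hda
  have hkb : c0 * b = k / a := by rw [hqb]; exact Int.ediv_mul_cancel (hqa ▸ hdb)
  have hexact : a * b * c0 = k := by
    calc a * b * c0 = (c0 * b) * a := by ring
    _ = (k / a) * a := by rw [hkb]
    _ = k := hka
  have hiff : ∀ c : Int, a * b * c = k ↔ c = c0 := by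
    intro c
    constructor
    · intro h
      have hab : 0 < a * b := by positivity
      have : a * b * c = a * b * c0 := by rw [h, hexact]
      exact mul_left_cancel₀ (ne_of_gt hab) this
    · intro h; rw [h, hexact]
  have hcong :
      (PySem.List.pyRange 1 (z + 1) 1).foldl (fun champ c =>
          if a * b * c = k then max champ ((x - a + 1) * (y - b + 1) * (z - c + 1))
          else champ) champ
        = (PySem.List.pyRange 1 (z + 1) 1).foldl (fun ch c =>
            if c = c0 then max ch ((x - a + 1) * (y - b + 1) * (z - c0 + 1))
            else ch) champ := by
    apply PySem.List.foldl_congr_mem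
    intro acc c _
    by_cases h : c = c0
    · subst h; rw [if_pos hexact, if_pos rfl]
    · rw [if_neg (fun hh => h ((hiff c).mp hh)), if_neg h]
  rw [hcong, foldl_max_at_point]
  simp only [PySem.List.mem_pyRange_one]
  exact if_congr (by omega) rfl rfl

-- a guarded running max over a list IS the fold of max over the filtered-and-mapped list
theorem foldl_guard_max_eq_filter_map (l : List Int) (p : Int → Bool) (v : Int → Int) :
    ∀ acc : Int,
      l.foldl (fun ch b => if p b then max ch (v b) else ch) acc
        = ((l.filter p).map v).foldl max acc := by
  induction l with
  | nil => intro acc; simp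
  | cons hd tl ih =>
    intro acc
    by_cases h : p hd
    · simp only [List.foldl_cons, if_pos h, List.filter_cons_of_pos h, List.map_cons,
        List.foldl_cons]
      exact ih (max acc (v hd))
    · simp only [List.foldl_cons, if_neg h, List.filter_cons_of_neg h]
      exact ih acc
  -- (`if_pos h`/`filter_cons_of_pos` need `p hd = true`; `by_cases` on a Bool gives exactly that)

-- a guarded fold of inner max-folds IS the fold of max over the filtered flatMap
theorem foldl_guard_fold_eq_flatMap (l : List Int) (p : Int → Bool) (g : Int → List Int) :
    ∀ acc : Int,
      l.foldl (fun ch a => if p a then (g a).foldl max ch else ch) acc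
        = ((l.filter p).flatMap g).foldl max acc := by
  induction l with
  | nil => intro acc; simp
  | cons hd tl ih =>
    intro acc
    by_cases h : p hd
    · simp only [List.foldl_cons, if_pos h, List.filter_cons_of_pos h, List.flatMap_cons,
        List.foldl_append]
      exact ih ((g hd).foldl max acc)
    · simp only [List.foldl_cons, if_neg h, List.filter_cons_of_neg h]
      exact ih acc

-- every candidate volume is at least 1
theorem vols_pos (x y z k : Int) : ∀ v ∈ solve_alt_vols x y z k, 1 ≤ v := by
  intro v hv
  unfold solve_alt_vols at hv
  rcases List.mem_flatMap.mp hv with ⟨a, ha, hv2⟩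
  rcases List.mem_map.mp hv2 with ⟨b, hb, hveq⟩
  rcases List.mem_filter.mp ha with ⟨hamem, _⟩
  rcases List.mem_filter.mp hb with ⟨hbmem, hbcond⟩
  have haR := PySem.List.mem_pyRange_one.mp hamem
  have hbR := PySem.List.mem_pyRange_one.mp hbmem
  simp only [Bool.and_eq_true, decide_eq_true_eq] at hbcond
  obtain ⟨⟨_, hc1⟩, hc2⟩ := hbcond
  subst hveq
  have h1 : (1:Int) ≤ x - a + 1 := by omega
  have h2 : (1:Int) ≤ y - b + 1 := by omega
  have h3 : (1:Int) ≤ z - PySem.Int.floordiv (PySem.Int.floordiv k a) b + 1 := by omega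
  have h12 : (1:Int) ≤ (x - a + 1) * (y - b + 1) := by
    have := mul_le_mul h1 h2 (by norm_num) (by omega)
    simpa using this
  have := mul_le_mul h12 h3 (by norm_num) (by omega)
  simpa using this

-- max(vols, default=0) is the running max from 0 when every element is ≥ 1
theorem maxD_eq_foldl_max_zero (l : List Int) (hpos : ∀ v ∈ l, 1 ≤ v) :
    PySem.List.maxD l (fun v => v) 0 = l.foldl max 0 := by
  cases l with
  | nil => rfl
  | cons hd tl =>
    have h0 : max 0 hd = hd := max_eq_right (by
      have := hpos hd List.mem_cons_self; omega)
    rw [PySem.List.maxD, PySem.List.max?_id_cons, Option.getD_some, List.foldl_cons, h0]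

-- ===== VERDICT (by name: the statement is the Claim_ definition above) =====
theorem solve_spec : Claim_equal_solve := by
  intro x y z k _
  unfold Spec_solve solve solve_alt
  rw [maxD_eq_foldl_max_zero _ (vols_pos x y z k)]
  unfold solve_alt_vols
  rw [← foldl_guard_fold_eq_flatMap]
  apply PySem.List.foldl_congr_mem
  intro champ a hamem
  have ha : 1 ≤ a := (PySem.List.mem_pyRange_one.mp hamem).1
  by_cases hmod : PySem.Int.mod k a = 0
  · have hda : a ∣ k := (PySem.Int.mod_eq_zero_iff_dvd k a).mp hmod
    have hp : (PySem.Int.mod k a == 0) = true := by simp [hmod]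
    rw [if_neg (by simp [hmod]), if_pos hp,
      ← foldl_guard_max_eq_filter_map]
    apply PySem.List.foldl_congr_mem
    intro ch b hbmem
    have hb : 1 ≤ b := (PySem.List.mem_pyRange_one.mp hbmem).1
    by_cases hmodb : PySem.Int.mod (PySem.Int.floordiv k a) b = 0
    · have hdb : b ∣ PySem.Int.floordiv k a :=
        (PySem.Int.mod_eq_zero_iff_dvd _ b).mp hmodb
      rw [if_neg (by simp [hmodb]), inner_loop_eq x y z k a b ha hb hda hdb ch]
      by_cases hc : 1 ≤ PySem.Int.floordiv (PySem.Int.floordiv k a) b ∧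
          PySem.Int.floordiv (PySem.Int.floordiv k a) b ≤ z
      · rw [if_pos hc, if_pos (by simp [hmodb, hc.1, hc.2])]
      · rw [if_neg hc, if_neg (by
          simp only [Bool.and_eq_true, decide_eq_true_eq]
          intro h; exact hc ⟨h.1.2, h.2⟩)]
    · rw [if_pos (by simpa using hmodb), if_neg (by
        simp only [Bool.and_eq_true, decide_eq_true_eq, beq_iff_eq]
        intro h; exact hmodb h.1.1)]
  · rw [if_pos (by simpa using hmod), if_neg (by simp [hmod])]
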